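-- pv_equiv track=rewrite | github.com/iZelikov/beegeek-algo | task_10_3.py | could_type
-- ===== SOURCE A (Python) =====
-- def could_type(word, typed):
--     i = 0
--     j = 0
--     while i < len(word) and j < len(typed):
--         if word[i] == typed[j]:
--             c = word[i]
--             n = k = 0
--             while i < len(word) and word[i] == c:
--                 n += 1
--                 i += 1
--             while j < len(typed) and typed[j] == c:
--                 k += 1
--                 j += 1
--             if k < n:
--                 return False
--         else:
--             return False
--     return i == len(word) and j == len(typed)
-- ===== SOURCE B (Python) =====
-- def _rle(s):
--     # run-length encoding: list of (char, run length), one pass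
--     groups = []
--     rest = s
--     while rest:
--         n = 1
--         while n < len(rest) and rest[n] == rest[0]:
--             n += 1
--         groups.append((rest[0], n))
--         rest = rest[n:]
--     return groups
--
--
-- def could_type(word, typed):
--     gw = _rle(word)
--     gt = _rle(typed)
--     return len(gw) == len(gt) and all(
--         cw == ct and nw <= nt for (cw, nw), (ct, nt) in zip(gw, gt)
--     )
-- ===== Notes on version B (the rewrite author's own statement) =====
-- stated objective: simpler
-- what changed: B computes full run-length encodings of both strings in one pass each and then compares the group lists (equal length, equal chars, typed run >= word run), instead of A's interleaved two-pointer walk with nested inner while loops and early returns.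
import Mathlib
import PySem

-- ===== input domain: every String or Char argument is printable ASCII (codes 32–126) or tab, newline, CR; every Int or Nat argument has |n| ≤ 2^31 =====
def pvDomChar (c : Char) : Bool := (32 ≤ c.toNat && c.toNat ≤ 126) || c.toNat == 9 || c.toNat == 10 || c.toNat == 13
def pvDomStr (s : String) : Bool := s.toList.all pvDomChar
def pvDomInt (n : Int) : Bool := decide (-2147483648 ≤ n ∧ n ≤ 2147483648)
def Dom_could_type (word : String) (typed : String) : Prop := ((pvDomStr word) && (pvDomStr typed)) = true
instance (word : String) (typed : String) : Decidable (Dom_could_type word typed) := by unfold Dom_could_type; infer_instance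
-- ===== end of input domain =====

-- B replaces A's interleaved two-pointer scan by computing run-length encodings of both
-- strings and comparing the group lists; objective: simpler decomposition, same cost.


-- ===== PORT A =====
-- A's outer while over the two cursors; the inner 'while' run counters become
-- takeWhile-lengths of the current suffixes, advancing the cursors = dropping the runs.
def could_type_loop : List Char → List Char → Bool
  | [], [] => true
  | [], _ :: _ => false
  | _ :: _, [] => false
  | c :: rw, d :: rt =>
    if c == d then
      let n := 1 + (rw.takeWhile (· == c)).length
      let k := 1 + (rt.takeWhile (· == c)).length
      if k < n then false
      else could_type_loop (rw.dropWhile (· == c)) (rt.dropWhile (· == c))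
    else false
termination_by w _ => w.length
decreasing_by
  simp only [List.length_cons]
  exact Nat.lt_succ_of_le (List.length_dropWhile_le _ _)

def could_type (word : String) (typed : String) : Bool :=
  could_type_loop word.toList typed.toList

-- ===== PORT B =====
-- run-length encoding: the inner run count is the leading run, then recurse on the rest
def pvRle : List Char → List (Char × Nat)
  | [] => []
  | c :: rest =>
    (c, 1 + (rest.takeWhile (· == c)).length) :: pvRle (rest.dropWhile (· == c))
termination_by s => s.length
decreasing_by
  simp only [List.length_cons]
  exact Nat.lt_succ_of_le (List.length_dropWhile_le _ _)

def could_type_alt (word : String) (typed : String) : Bool :=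
  let gw := pvRle word.toList
  let gt := pvRle typed.toList
  gw.length == gt.length &&
    (gw.zip gt).all (fun p => p.1.1 == p.2.1 && decide (p.1.2 ≤ p.2.2))

-- ===== PRECONDITION & SPEC =====
def Spec_could_type (word : String) (typed : String) (out : Bool) : Prop := out = could_type_alt word typed
instance (word : String) (typed : String) (out : Bool) : Decidable (Spec_could_type word typed out) := by unfold Spec_could_type; infer_instance

-- ===== CLAIM (what is proved, stated in full; the proofs are below) =====
def Claim_equal_could_type : Prop := ∀ (word : String) (typed : String), Dom_could_type word typed → Spec_could_type word typed (could_type word typed)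

-- ===== LEMMAS AND PROOFS =====
def pvCheck : List (Char × Nat) → List (Char × Nat) → Bool :=
  fun gw gt =>
    gw.length == gt.length &&
      (gw.zip gt).all (fun p => p.1.1 == p.2.1 && decide (p.1.2 ≤ p.2.2))

theorem pvAlt_eq_check (word typed : String) :
    could_type_alt word typed = pvCheck (pvRle word.toList) (pvRle typed.toList) := rfl

theorem pvLoop_eq_check (w t : List Char) :
    could_type_loop w t = pvCheck (pvRle w) (pvRle t) := by
  fun_induction could_type_loop w t with
  | case1 => simp [pvRle, pvCheck]
  | case2 => simp [pvRle, pvCheck]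
  | case3 => simp [pvRle, pvCheck]
  | case4 c rw d rt hcd n k hlt =>
    -- k < n branch: both sides false
    have hd : d = c := (beq_iff_eq.mp hcd).symm
    subst hd
    simp only [pvRle, pvCheck, List.zip_cons_cons, List.all_cons, List.length_cons]
    simp only [n, k] at hlt
    simp
    omega
  | case5 c rw d rt hcd n k hge ih =>
    -- k ≥ n branch: recurse
    have hd : d = c := (beq_iff_eq.mp hcd).symm
    subst hd
    rw [ih]
    simp only [n, k] at hge
    have hle : (rw.takeWhile (· == d)).length ≤ (rt.takeWhile (· == d)).length := by omega
    simp [pvRle, pvCheck, List.all_cons, hle]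
  | case6 c rw d rt hcd =>
    simp [pvRle, pvCheck, List.all_cons, hcd]

-- ===== VERDICT (by name: the statement is the Claim_ definition above) =====
theorem could_type_spec : Claim_equal_could_type := by
  intro word typed _
  unfold Spec_could_type could_type
  rw [pvAlt_eq_check, pvLoop_eq_check]
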